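-- pv_equiv track=rewrite | github.com/joseph-birara/Competitive-programming | codeforce/E_Word_Transformation.py | find_last
-- ===== SOURCE A (Python) =====
-- def find_last(arr, k,mth):
--     count = 0
--     for i in range(len(arr)-1, -1, -1):
--         if arr[i] == k:
--             count += 1
--             if count == mth :
--                 return i
--     return -1
-- ===== SOURCE B (Python) =====
-- def find_last(arr, k, mth):
--     idx = [i for i, x in enumerate(arr) if x == k]
--     if 1 <= mth <= len(idx):
--         return idx[-mth]
--     return -1
-- ===== Notes on version B (the rewrite author's own statement) =====
-- stated objective: simpler
-- what changed: Replaces the backward counting loop with early exit by a forward comprehension collecting all matching positions and a direct negative index idx[-mth].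
import Mathlib
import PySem

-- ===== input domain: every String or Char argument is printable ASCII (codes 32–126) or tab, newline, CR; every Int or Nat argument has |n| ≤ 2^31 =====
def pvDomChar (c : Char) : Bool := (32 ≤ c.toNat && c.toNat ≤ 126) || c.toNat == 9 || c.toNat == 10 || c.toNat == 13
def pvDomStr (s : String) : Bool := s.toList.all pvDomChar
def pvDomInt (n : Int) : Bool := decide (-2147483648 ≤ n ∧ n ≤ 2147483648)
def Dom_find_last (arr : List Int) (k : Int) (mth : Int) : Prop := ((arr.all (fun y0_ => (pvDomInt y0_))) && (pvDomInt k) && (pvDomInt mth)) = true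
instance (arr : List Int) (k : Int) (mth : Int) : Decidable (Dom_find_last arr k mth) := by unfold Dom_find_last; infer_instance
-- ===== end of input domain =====

-- B replaces A's backward counting loop (early return on the mth match) by a forward
-- comprehension of all matching positions plus one negative index; objective: simpler.

-- ===== PORT A =====
-- the backward 'for i in range(len(arr)-1, -1, -1)' loop with the running count and early return
def findLastGo (arr : List Int) (k : Int) (mth : Int) : Nat → Int → Int
  | 0, _ => -1
  | n + 1, count =>
    if PySem.List.pyGetD arr (n : Int) 0 == k then
      if count + 1 == mth then (n : Int) else findLastGo arr k mth n (count + 1)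
    else findLastGo arr k mth n count

def find_last (arr : List Int) (k : Int) (mth : Int) : Int :=
  findLastGo arr k mth arr.length 0

-- ===== PORT B =====
-- idx = [i for i, x in enumerate(arr) if x == k]
def occIdx (arr : List Int) (k : Int) : List Int :=
  (PySem.List.enumerate arr 0).filterMap (fun p => if p.2 == k then some p.1 else none)

def find_last_alt (arr : List Int) (k : Int) (mth : Int) : Int :=
  let idx := occIdx arr k
  if 1 ≤ mth ∧ mth ≤ (idx.length : Int) then PySem.List.pyGetD idx (-mth) (-1)
  else -1

-- ===== PRECONDITION & SPEC =====
def Spec_find_last (arr : List Int) (k : Int) (mth : Int) (out : Int) : Prop := out = find_last_alt arr k mth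
instance (arr : List Int) (k : Int) (mth : Int) (out : Int) : Decidable (Spec_find_last arr k mth out) := by unfold Spec_find_last; infer_instance

-- ===== CLAIM (what is proved, stated in full; the proofs are below) =====
def Claim_equal_find_last : Prop := ∀ (arr : List Int) (k : Int) (mth : Int), Dom_find_last arr k mth → Spec_find_last arr k mth (find_last arr k mth)

-- ===== LEMMAS AND PROOFS =====

lemma occIdx_append_singleton (ys : List Int) (y k : Int) :
    occIdx (ys ++ [y]) k
      = occIdx ys k ++ (if y == k then [(ys.length : Int)] else []) := by
  simp only [occIdx, PySem.List.enumerate_append, List.filterMap_append,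
    PySem.List.enumerate_cons, PySem.List.enumerate_nil, List.filterMap]
  split_ifs with h <;> simp_all

lemma go_spec (arr : List Int) (k mth : Int) :
    ∀ (n : Nat) (c : Int), n ≤ arr.length →
      findLastGo arr k mth n c =
        (let js := occIdx (arr.take n) k
         if c < mth ∧ mth - c ≤ (js.length : Int) then
           js.getD (js.length - (mth - c).toNat) (-1)
         else -1) := by
  intro n
  induction n with
  | zero =>
    intro c _
    simp [findLastGo, occIdx, PySem.List.enumerate_nil]
  | succ n ih =>
    intro c hn
    have hlt : n < arr.length := by omega
    have htake : arr.take (n + 1) = arr.take n ++ [arr[n]] := by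
      rw [List.take_add_one]
      simp [List.getElem?_eq_getElem hlt]
    have hlen : (arr.take n).length = n := by simp; omega
    have hget : PySem.List.pyGetD arr (n : Int) 0 = arr[n] := by
      rw [PySem.List.pyGetD_natCast]
      simp [List.getD, List.getElem?_eq_getElem hlt]
    rw [htake, occIdx_append_singleton, hlen]
    simp only [findLastGo, hget]
    by_cases hm : arr[n] == k
    · simp only [hm, if_pos]
      by_cases hc : c + 1 == mth
      · have hc' : mth - c = 1 := by
          have := of_decide_eq_true hc; omega
        simp [hc, hc', List.getD]
        omega
      · have hc' : ¬ (c + 1 = mth) := by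
          intro h; exact hc (by simp [h])
        rw [if_neg (by simpa using hc'), ih (c + 1) (by omega)]
        simp only [List.length_append, List.length_cons, List.length_nil]
        by_cases hcond : c + 1 < mth ∧ mth - (c + 1) ≤ ((occIdx (arr.take n) k).length : Int)
        · rw [if_pos hcond, if_pos ⟨by omega, by push_cast; omega⟩]
          have hidx : (occIdx (arr.take n) k).length + 1 - (mth - c).toNat
              = (occIdx (arr.take n) k).length - (mth - (c+1)).toNat := by omega
          rw [hidx]
          have hlt2 : (occIdx (arr.take n) k).length - (mth - (c+1)).toNat
              < (occIdx (arr.take n) k).length := by omega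
          rw [List.getD, List.getD, List.getElem?_append_left hlt2]
        · rw [if_neg hcond, if_neg]
          push_cast
          omega
    · simp only [hm, if_neg, Bool.false_eq_true, not_false_iff,
        List.append_nil]
      exact ih c (by omega)

-- ===== VERDICT (by name: the statement is the Claim_ definition above) =====
theorem find_last_spec : Claim_equal_find_last := by
  intro arr k mth _
  unfold Spec_find_last find_last find_last_alt
  rw [go_spec arr k mth arr.length 0 (le_refl _)]
  simp only [List.take_length]
  set js := occIdx arr k with hjs
  by_cases h : 1 ≤ mth ∧ mth ≤ (js.length : Int)
  · rw [if_pos h, if_pos ⟨by omega, by omega⟩]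
    obtain ⟨h1, h2⟩ := h
    have hm : mth = ((mth.toNat : Nat) : Int) := by omega
    rw [hm, PySem.List.pyGetD_neg_natCast js mth.toNat (-1) (by omega) (by omega)]
    have hlt : js.length - mth.toNat < js.length := by omega
    have he : (((mth.toNat : Int)) - 0).toNat = mth.toNat := by omega
    rw [he, List.getD, List.getElem?_eq_getElem hlt, Option.getD_some]
  · rw [if_neg h, if_neg (by omega)]
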